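-- pv_equiv track=rewrite | github.com/jennyzzt/LLM_debate_on_ARC | ARC_gen_agents2_rounds2_openai/44d8ac46/agent0/algo0.py | solve
-- ===== SOURCE A (Python) =====
-- def solve(input_grid):
--     # Copy the input grid to avoid modifying the original grid
--     output_grid = [row[:] for row in input_grid]
--
--     # Get the dimensions of the grid
--     rows = len(input_grid)
--     cols = len(input_grid[0])
--
--     # Function to count the number of '5' cells adjacent (horizontally or vertically) to a given cell
--     def count_adjacent_fives(r, c):
--         adjacent_fives = 0
--         for dr, dc in [(-1, 0), (1, 0), (0, -1), (0, 1)]:  # Directions: up, down, left, right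
--             nr, nc = r + dr, c + dc
--             if 0 <= nr < rows and 0 <= nc < cols and input_grid[nr][nc] == 5:
--                 adjacent_fives += 1
--         return adjacent_fives
--
--     # Iterate through the grid and apply the transformation rule
--     for r in range(rows):
--         for c in range(cols):
--             if input_grid[r][c] == 0 and count_adjacent_fives(r, c) >= 2:
--                 output_grid[r][c] = 2
--
--     return output_grid
-- ===== SOURCE B (Python) =====
-- def solve(input_grid):
--     rows = len(input_grid)
--     cols = len(input_grid[0])
--     # Scatter pass: every 5-cell contributes 1 to each in-bounds orthogonal neighbour.
--     neighbors = []
--     for r in range(rows):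
--         for c in range(cols):
--             if input_grid[r][c] == 5:
--                 for nr, nc in ((r - 1, c), (r + 1, c), (r, c - 1), (r, c + 1)):
--                     if 0 <= nr < rows and 0 <= nc < cols:
--                         neighbors.append((nr, nc))
--     counts = {}
--     for p in neighbors:
--         counts[p] = counts.get(p, 0) + 1
--     # Apply marks to a copy: a 0-cell with at least two contributions becomes 2.
--     output_grid = [row[:] for row in input_grid]
--     for (r, c), k in counts.items():
--         if k >= 2 and input_grid[r][c] == 0:
--             output_grid[r][c] = 2
--     return output_grid
-- ===== Notes on version B (the rewrite author's own statement) =====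
-- stated objective: alternative
-- what changed: A gathers per cell (for every 0-cell it re-counts its four neighbours); B scatters: one pass over the grid lets every 5-cell increment a dict counter at each in-bounds orthogonal neighbour, then a second pass marks the 0-cells whose counter reached 2.
-- outside the precondition, e.g. on solve([]): A raises IndexError, B raises IndexError
import Mathlib
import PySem

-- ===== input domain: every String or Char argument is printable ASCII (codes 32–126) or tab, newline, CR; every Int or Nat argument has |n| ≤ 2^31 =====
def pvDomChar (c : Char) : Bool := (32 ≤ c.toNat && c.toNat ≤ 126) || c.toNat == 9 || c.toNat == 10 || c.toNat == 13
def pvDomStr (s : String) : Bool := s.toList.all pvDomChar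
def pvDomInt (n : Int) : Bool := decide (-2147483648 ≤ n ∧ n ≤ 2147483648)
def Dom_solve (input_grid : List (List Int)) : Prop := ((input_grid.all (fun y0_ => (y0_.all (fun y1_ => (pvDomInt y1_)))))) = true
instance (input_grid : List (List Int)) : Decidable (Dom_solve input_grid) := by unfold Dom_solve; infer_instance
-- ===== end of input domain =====

-- B replaces A's per-cell gather (count the 5-neighbours of every cell) by a scatter pass:
-- each 5-cell increments a dict counter at its in-bounds orthogonal neighbours, then the marks
-- (0-cell with counter ≥ 2 becomes 2) are applied to a copy; objective: alternative decomposition.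

-- ===== PORT A =====
-- the four orthogonal directions, shared literal of both programs
def pvDirs : List (Int × Int) := [(-1, 0), (1, 0), (0, -1), (0, 1)]

-- input_grid[r][c]; every access in either program is for 0 ≤ r,c in range on Pre_, where this is Python-exact
def pvCell (g : List (List Int)) (r c : Int) : Int :=
  PySem.List.pyGetD (PySem.List.pyGetD g r []) c 0

-- A's count_adjacent_fives(r, c)
def pvCountAdj (g : List (List Int)) (rows cols r c : Int) : Int :=
  pvDirs.foldl (fun acc d =>
    if 0 ≤ r + d.1 ∧ r + d.1 < rows ∧ 0 ≤ c + d.2 ∧ c + d.2 < cols ∧ pvCell g (r + d.1) (c + d.2) == 5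
    then acc + 1 else acc) 0

-- output_grid[r][c] = 2; both programs only call it with 0 ≤ r < rows, 0 ≤ c < cols, where toNat indexing is Python-exact
def pvSet2 (out : List (List Int)) (r c : Int) : List (List Int) :=
  out.modify r.toNat (fun row => row.set c.toNat 2)

def solve (input_grid : List (List Int)) : List (List Int) :=
  let rows : Int := input_grid.length
  let cols : Int := (PySem.List.pyGetD input_grid 0 []).length  -- len(input_grid[0]); IndexError on [] is excluded by Pre_
  -- the copy output_grid = [row[:] for row in input_grid] is input_grid itself (immutable lists)
  (PySem.List.pyRange 0 rows).foldl (fun out r =>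
    (PySem.List.pyRange 0 cols).foldl (fun out c =>
      if pvCell input_grid r c == 0 ∧ 2 ≤ pvCountAdj input_grid rows cols r c then
        pvSet2 out r c
      else out) out) input_grid

-- ===== PORT B =====
-- the in-bounds orthogonal neighbours appended for one 5-cell (the inner for/if of Source B's scatter loop)
def pvNeighList (rows cols r c : Int) : List (Int × Int) :=
  pvDirs.foldl (fun acc d =>
    if 0 ≤ r + d.1 ∧ r + d.1 < rows ∧ 0 ≤ c + d.2 ∧ c + d.2 < cols
    then acc ++ [(r + d.1, c + d.2)] else acc) []

def solve_alt (input_grid : List (List Int)) : List (List Int) :=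
  let rows : Int := input_grid.length
  let cols : Int := (PySem.List.pyGetD input_grid 0 []).length  -- len(input_grid[0]); IndexError on [] is excluded by Pre_
  let neighbors : List (Int × Int) :=
    (PySem.List.pyRange 0 rows).foldl (fun acc r =>
      (PySem.List.pyRange 0 cols).foldl (fun acc c =>
        if pvCell input_grid r c == 5 then acc ++ pvNeighList rows cols r c else acc) acc) []
  let counts : PySem.Dict (Int × Int) Int :=
    neighbors.foldl (fun d p => d.insert p (d.getD p 0 + 1)) PySem.Dict.empty
  counts.items.foldl (fun out it =>
    if 2 ≤ it.2 ∧ pvCell input_grid it.1.1 it.1.2 == 0 then pvSet2 out it.1.1 it.1.2 else out)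
    input_grid

-- ===== PRECONDITION & SPEC =====
-- Pre_ is exactly where A returns: on [] the read input_grid[0] raises IndexError, and when some row is
-- shorter than the first row the main loop's input_grid[r][c] raises IndexError (B raises there too).
def Pre_solve (input_grid : List (List Int)) : Prop :=
  input_grid ≠ [] ∧ ∀ row ∈ input_grid, (input_grid.headD []).length ≤ row.length
instance (input_grid : List (List Int)) : Decidable (Pre_solve input_grid) := by unfold Pre_solve; infer_instance

def pvWitness_solve : List (List Int) := [[0, 5], [5, 0]]

def Spec_solve (input_grid : List (List Int)) (out : List (List Int)) : Prop := out = solve_alt input_grid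
instance (input_grid : List (List Int)) (out : List (List Int)) : Decidable (Spec_solve input_grid out) := by unfold Spec_solve; infer_instance

-- ===== CLAIM (what is proved, stated in full; the proofs are below) =====
def Claim_equal_solve : Prop := ∀ (input_grid : List (List Int)), Dom_solve input_grid → Pre_solve input_grid → Spec_solve input_grid (solve input_grid)

-- ===== LEMMAS AND PROOFS =====

-- in-bounds predicate
def pvInB (rows cols : Int) (p : Int × Int) : Prop :=
  0 ≤ p.1 ∧ p.1 < rows ∧ 0 ≤ p.2 ∧ p.2 < cols

-- the row/column product list both characterizations are indexed by
def pvPL (rows cols : Int) : List (Int × Int) :=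
  (PySem.List.pyRange 0 rows).flatMap (fun r => (PySem.List.pyRange 0 cols).map (fun c => (r, c)))

lemma pvNodup_pyRange (n : Int) : (PySem.List.pyRange 0 n).Nodup := by
  by_cases h : 0 ≤ n
  · obtain ⟨m, rfl⟩ := Int.eq_ofNat_of_zero_le h
    rw [PySem.List.pyRange_zero_natCast]
    exact List.nodup_range.map (fun a b => by omega)
  · have : PySem.List.pyRange 0 n = [] := by
      rw [List.eq_nil_iff_forall_not_mem]
      intro x hx
      rw [PySem.List.mem_pyRange_one] at hx
      omega
    simp [this]

lemma pvMem_PL {rows cols : Int} {p : Int × Int} : p ∈ pvPL rows cols ↔ pvInB rows cols p := by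
  simp only [pvPL, pvInB, List.mem_flatMap, List.mem_map, PySem.List.mem_pyRange_one]
  constructor
  · rintro ⟨r, hr, c, hc, rfl⟩
    exact ⟨hr.1, hr.2, hc.1, hc.2⟩
  · rintro ⟨h1, h2, h3, h4⟩
    exact ⟨p.1, ⟨h1, h2⟩, p.2, ⟨h3, h4⟩, rfl⟩

lemma pvPL_nodup (rows cols : Int) : (pvPL rows cols).Nodup := by
  rw [pvPL, List.nodup_flatMap]
  refine ⟨fun r _ => (pvNodup_pyRange cols).map (fun a b h => by injection h), ?_⟩
  refine List.Pairwise.imp ?_ ((pvNodup_pyRange rows))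
  intro a b hab x hxa hxb
  simp only [List.mem_map] at hxa hxb
  obtain ⟨c1, _, rfl⟩ := hxa
  obtain ⟨c2, _, h⟩ := hxb
  exact hab (by injection h with h1 h2; exact h1.symm)

-- shape preservation
lemma pvLength_set2 (out : List (List Int)) (r c : Int) : (pvSet2 out r c).length = out.length := by
  simp [pvSet2]

lemma pvRowLen_set2 (out : List (List Int)) (r c : Int) (i : Nat) :
    ((pvSet2 out r c).getD i []).length = (out.getD i []).length := by
  simp only [pvSet2, List.getD_eq_getElem?_getD, List.getElem?_modify]
  cases h : out[i]? with
  | none => simp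
  | some row =>
    simp only [Option.map_eq_map, Option.map_some]
    by_cases hi : r.toNat = i <;> simp [hi]

-- one write, observed through pvCell
lemma pvCell_set2 (g out : List (List Int)) (rows cols : Int)
    (hrows : rows = (g.length : Int)) (hcols : ∀ row ∈ g, cols ≤ (row.length : Int))
    (hlen : out.length = g.length) (hrow : ∀ i, (out.getD i []).length = (g.getD i []).length)
    (a b r c : Int) (hab : pvInB rows cols (a, b)) (hr : 0 ≤ r) (hc : 0 ≤ c) :
    pvCell (pvSet2 out a b) r c = if a = r ∧ b = c then 2 else pvCell out r c := by
  obtain ⟨ha0, ha1, hb0, hb1⟩ := hab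
  have hmem : g.getD a.toNat [] ∈ g := by
    rw [List.getD_eq_getElem?_getD]
    cases hg : g[a.toNat]? with
    | none => rw [List.getElem?_eq_none_iff] at hg; omega
    | some row => simpa using List.mem_of_getElem? hg
  have hrowlen : b.toNat < (out.getD a.toNat []).length := by
    rw [hrow a.toNat]
    have := hcols _ hmem
    omega
  simp only [pvCell, pvSet2, PySem.List.pyGetD_of_nonneg _ _ hr, PySem.List.pyGetD_of_nonneg _ _ hc,
    List.getD_eq_getElem?_getD, List.getElem?_modify]
  by_cases hra : a.toNat = r.toNat
  · have har : a = r := by omega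
    cases hout : out[r.toNat]? with
    | none =>
      exfalso
      rw [List.getElem?_eq_none_iff] at hout
      omega
    | some row =>
      have hrowval : out.getD r.toNat [] = row := by simp [List.getD_eq_getElem?_getD, hout]
      have hblen : b.toNat < row.length := by rw [hra, hrowval] at hrowlen; exact hrowlen
      simp only [hra, Option.map_eq_map, Option.map_some, Option.getD_some]
      by_cases hbc : b.toNat = c.toNat
      · have hbc' : b = c := by omega
        rw [hbc] at hblen
        simp [hblen, har, hbc']
      · have hbc' : ¬ (b = c) := by omega
        simp [hbc, har, hbc']
  · have har : ¬ (a = r) := by omega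
    simp [hra, har]

-- the generic marking loop, pointwise
lemma pvCell_markFold {α : Type} (g : List (List Int)) (rows cols : Int)
    (hrows : rows = (g.length : Int)) (hcols : ∀ row ∈ g, cols ≤ (row.length : Int))
    (key : α → Int × Int) (pred : α → Prop) [DecidablePred pred]
    (L : List α) (hL : ∀ x ∈ L, pred x → pvInB rows cols (key x))
    (out : List (List Int)) (hlen : out.length = g.length)
    (hrow : ∀ i, (out.getD i []).length = (g.getD i []).length)
    (r c : Int) (hr : 0 ≤ r) (hc : 0 ≤ c) :
    ((∃ x ∈ L, pred x ∧ key x = (r, c)) →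
        pvCell (L.foldl (fun out x => if pred x then pvSet2 out (key x).1 (key x).2 else out) out) r c = 2) ∧
    (¬ (∃ x ∈ L, pred x ∧ key x = (r, c)) →
        pvCell (L.foldl (fun out x => if pred x then pvSet2 out (key x).1 (key x).2 else out) out) r c = pvCell out r c) := by
  induction L generalizing out with
  | nil => exact ⟨(by rintro ⟨x, hx, -⟩; cases hx), fun _ => rfl⟩
  | cons x L ih =>
    have hL' : ∀ y ∈ L, pred y → pvInB rows cols (key y) := fun y hy => hL y (List.mem_cons_of_mem x hy)
    simp only [List.foldl_cons]
    by_cases hx : pred x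
    · rw [if_pos hx]
      have hshape1 : (pvSet2 out (key x).1 (key x).2).length = g.length := by
        rw [pvLength_set2]; exact hlen
      have hshape2 : ∀ i, ((pvSet2 out (key x).1 (key x).2).getD i []).length = (g.getD i []).length := by
        intro i; rw [pvRowLen_set2]; exact hrow i
      have hInB : pvInB rows cols (key x) := hL x List.mem_cons_self hx
      have hc2 := pvCell_set2 g out rows cols hrows hcols hlen hrow (key x).1 (key x).2 r c hInB hr hc
      obtain ⟨ih1, ih2⟩ := ih hL' _ hshape1 hshape2
      constructor
      · rintro ⟨y, hy, hpy, hky⟩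
        rcases List.mem_cons.mp hy with rfl | hyL
        · by_cases hrest : ∃ z ∈ L, pred z ∧ key z = (r, c)
          · exact ih1 hrest
          · rw [ih2 hrest, hc2, hky, if_pos ⟨rfl, rfl⟩]
        · exact ih1 ⟨y, hyL, hpy, hky⟩
      · intro hno
        have hnoL : ¬ ∃ z ∈ L, pred z ∧ key z = (r, c) := by
          rintro ⟨z, hz, hpz, hkz⟩
          exact hno ⟨z, List.mem_cons_of_mem x hz, hpz, hkz⟩
        have hkx : ¬ ((key x).1 = r ∧ (key x).2 = c) := by
          rintro ⟨h1, h2⟩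
          exact hno ⟨x, List.mem_cons_self, hx, Prod.ext h1 h2⟩
        rw [ih2 hnoL, hc2, if_neg hkx]
    · rw [if_neg hx]
      obtain ⟨ih1, ih2⟩ := ih hL' _ hlen hrow
      constructor
      · rintro ⟨y, hy, hpy, hky⟩
        rcases List.mem_cons.mp hy with rfl | hyL
        · exact absurd hpy hx
        · exact ih1 ⟨y, hyL, hpy, hky⟩
      · intro hno
        refine ih2 ?_
        rintro ⟨z, hz, hpz, hkz⟩
        exact hno ⟨z, List.mem_cons_of_mem x hz, hpz, hkz⟩

lemma pvLength_markFold {α : Type} (key : α → Int × Int) (pred : α → Prop) [DecidablePred pred]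
    (L : List α) (out : List (List Int)) :
    (L.foldl (fun out x => if pred x then pvSet2 out (key x).1 (key x).2 else out) out).length = out.length := by
  induction L generalizing out with
  | nil => rfl
  | cons x L ih =>
    simp only [List.foldl_cons]
    by_cases hx : pred x
    · rw [if_pos hx, ih, pvLength_set2]
    · rw [if_neg hx, ih]

lemma pvRowLen_markFold {α : Type} (key : α → Int × Int) (pred : α → Prop) [DecidablePred pred]
    (L : List α) (out : List (List Int)) (i : Nat) :
    ((L.foldl (fun out x => if pred x then pvSet2 out (key x).1 (key x).2 else out) out).getD i []).length
      = (out.getD i []).length := by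
  induction L generalizing out with
  | nil => rfl
  | cons x L ih =>
    simp only [List.foldl_cons]
    by_cases hx : pred x
    · rw [if_pos hx, ih, pvRowLen_set2]
    · rw [if_neg hx, ih]

-- the neighbour list as filter-then-map over the direction list
lemma pvNeighList_eq (rows cols r c : Int) :
    pvNeighList rows cols r c =
      (pvDirs.filter (fun d =>
          decide (0 ≤ r + d.1 ∧ r + d.1 < rows ∧ 0 ≤ c + d.2 ∧ c + d.2 < cols))).map
        (fun d => (r + d.1, c + d.2)) := by
  rw [pvNeighList, PySem.List.foldl_append_ite
    (p := fun d : Int × Int => 0 ≤ r + d.1 ∧ r + d.1 < rows ∧ 0 ≤ c + d.2 ∧ c + d.2 < cols)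
    (f := fun d : Int × Int => (r + d.1, c + d.2))]
  simp

-- membership in the 4-neighbour list
lemma pvMem_neighList {rows cols r c : Int} {q : Int × Int} :
    q ∈ pvNeighList rows cols r c ↔
      pvInB rows cols q ∧ (q = (r - 1, c) ∨ q = (r + 1, c) ∨ q = (r, c - 1) ∨ q = (r, c + 1)) := by
  obtain ⟨q1, q2⟩ := q
  rw [pvNeighList_eq]
  simp only [List.mem_map, List.mem_filter, pvDirs, List.mem_cons, List.not_mem_nil, or_false,
    pvInB, Prod.mk.injEq, decide_eq_true_eq]
  constructor
  · rintro ⟨d, ⟨hd, hp⟩, h1, h2⟩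
    rcases hd with rfl | rfl | rfl | rfl <;> simp_all <;> omega
  · rintro ⟨hin, (⟨rfl, rfl⟩ | ⟨rfl, rfl⟩ | ⟨rfl, rfl⟩ | ⟨rfl, rfl⟩)⟩
    · exact ⟨(-1, 0), ⟨Or.inl rfl, by simp at hin ⊢; omega⟩, by omega, by omega⟩
    · exact ⟨(1, 0), ⟨Or.inr (Or.inl rfl), by simp at hin ⊢; omega⟩, by omega, by omega⟩
    · exact ⟨(0, -1), ⟨Or.inr (Or.inr (Or.inl rfl)), by simp at hin ⊢; omega⟩, by omega, by omega⟩
    · exact ⟨(0, 1), ⟨Or.inr (Or.inr (Or.inr rfl)), by simp at hin ⊢; omega⟩, by omega, by omega⟩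

lemma pvNeighList_nodup (rows cols r c : Int) : (pvNeighList rows cols r c).Nodup := by
  rw [pvNeighList_eq]
  refine List.Nodup.map_on ?_ (List.Nodup.filter _ (by decide))
  intro x hx y hy h
  simp only [List.mem_filter, pvDirs, List.mem_cons, List.not_mem_nil, or_false] at hx hy
  obtain ⟨x1, x2⟩ := x
  obtain ⟨y1, y2⟩ := y
  simp only [Prod.mk.injEq] at h
  rcases hx.1 with h1 | h1 | h1 | h1 <;> rcases hy.1 with h2 | h2 | h2 | h2 <;>
    simp_all

-- scatter = gather: the multiplicity of q in the flat neighbour list equals A's adjacent-5 count at q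
lemma pvScatter_gather (g : List (List Int)) (rows cols : Int)
    (q : Int × Int) (hq : pvInB rows cols q) :
    ((((pvPL rows cols).flatMap
        (fun p => if pvCell g p.1 p.2 == 5 then pvNeighList rows cols p.1 p.2 else [])).count q : Nat) : Int)
      = pvCountAdj g rows cols q.1 q.2 := by
  have hsym : ∀ p : Int × Int, pvInB rows cols p →
      (q ∈ pvNeighList rows cols p.1 p.2 ↔ p ∈ pvNeighList rows cols q.1 q.2) := by
    intro p hp
    obtain ⟨p1, p2⟩ := p
    obtain ⟨q1, q2⟩ := q
    simp only [pvMem_neighList, pvInB, Prod.mk.injEq] at hp hq ⊢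
    omega
  rw [List.count_flatMap]
  have hterm : ∀ p ∈ pvPL rows cols,
      (List.count q ∘ fun p => if pvCell g p.1 p.2 == 5 then pvNeighList rows cols p.1 p.2 else []) p
        = if (p ∈ pvNeighList rows cols q.1 q.2 ∧ pvCell g p.1 p.2 == 5) then 1 else 0 := by
    intro p hp
    have hpInB : pvInB rows cols p := pvMem_PL.mp hp
    by_cases h5 : pvCell g p.1 p.2 == 5
    · simp only [Function.comp_apply, if_pos h5]
      by_cases hmem : q ∈ pvNeighList rows cols p.1 p.2
      · rw [List.count_eq_one_of_mem (pvNeighList_nodup _ _ _ _) hmem,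
          if_pos ⟨(hsym p hpInB).mp hmem, h5⟩]
      · rw [List.count_eq_zero.mpr hmem,
          if_neg (fun h => hmem ((hsym p hpInB).mpr h.1))]
    · have hne : ¬ (pvCell g p.1 p.2 = 5) := by simpa using h5
      simp [Function.comp_apply, hne]
  rw [List.map_congr_left hterm, PySem.List.sum_map_ite_one_zero_nat']
  have hsplit : List.countP
        (fun p => decide (p ∈ pvNeighList rows cols q.1 q.2 ∧ pvCell g p.1 p.2 == 5))
        (pvPL rows cols)
      = List.countP (fun p : Int × Int => pvCell g p.1 p.2 == 5)
          ((pvPL rows cols).filter (fun p => decide (p ∈ pvNeighList rows cols q.1 q.2))) := by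
    rw [List.countP_filter]
    refine List.countP_congr ?_
    intro p _
    simp only [Bool.and_eq_true, decide_eq_true_eq]
    tauto
  rw [hsplit]
  have hperm : ((pvPL rows cols).filter
        (fun p => decide (p ∈ pvNeighList rows cols q.1 q.2))).Perm
      (pvNeighList rows cols q.1 q.2) := by
    rw [List.perm_ext_iff_of_nodup (List.Nodup.filter _ (pvPL_nodup _ _)) (pvNeighList_nodup _ _ _ _)]
    intro a
    simp only [List.mem_filter, decide_eq_true_eq]
    exact ⟨fun h => h.2, fun h => ⟨pvMem_PL.mpr (pvMem_neighList.mp h).1, h⟩⟩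
  rw [hperm.countP_eq, pvNeighList_eq, List.countP_map, List.countP_filter,
    pvCountAdj, PySem.List.foldl_ite_add_one]
  rw [zero_add]
  congr 1
  refine List.countP_congr ?_
  intro d _
  simp only [Function.comp_apply, Bool.and_eq_true, decide_eq_true_eq]
  tauto

-- A's nested loops as one marking fold over the row/column product list
lemma pvSolve_eq_markFold (g : List (List Int)) :
    solve g =
      (pvPL (g.length : Int) ((PySem.List.pyGetD g 0 []).length : Int)).foldl
        (fun out p =>
          if pvCell g p.1 p.2 == 0 ∧
              2 ≤ pvCountAdj g (g.length : Int) ((PySem.List.pyGetD g 0 []).length : Int) p.1 p.2 then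
            pvSet2 out p.1 p.2
          else out) g := by
  rw [pvPL, List.foldl_flatMap]
  simp only [List.foldl_map]
  rfl

-- B's scatter loops produce the flat neighbour list of the product list
lemma pvNB_def (g : List (List Int)) (rows cols : Int) :
    (PySem.List.pyRange 0 rows).foldl (fun acc r =>
      (PySem.List.pyRange 0 cols).foldl (fun acc c =>
        if pvCell g r c == 5 then acc ++ pvNeighList rows cols r c else acc) acc) []
    = (pvPL rows cols).flatMap
        (fun p => if pvCell g p.1 p.2 == 5 then pvNeighList rows cols p.1 p.2 else []) := by
  have hstep : (fun (acc : List (Int × Int)) r =>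
        (PySem.List.pyRange 0 cols).foldl (fun acc c =>
          if pvCell g r c == 5 then acc ++ pvNeighList rows cols r c else acc) acc)
      = fun acc r => acc ++
          ((PySem.List.pyRange 0 cols).flatMap
            (fun c => if pvCell g r c == 5 then pvNeighList rows cols r c else [])) := by
    funext acc r
    have hinner : (fun (acc : List (Int × Int)) c =>
          if pvCell g r c == 5 then acc ++ pvNeighList rows cols r c else acc)
        = fun acc c => acc ++ (if pvCell g r c == 5 then pvNeighList rows cols r c else []) := by
      funext acc c
      split_ifs <;> simp
    rw [hinner, PySem.List.foldl_append_eq_flatMap]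
  rw [hstep, PySem.List.foldl_append_eq_flatMap, List.nil_append, pvPL, List.flatMap_assoc]
  congr 1
  funext r
  rw [List.flatMap_map]

-- B as one marking fold over the counter's item list
lemma pvSolveAlt_eq_markFold (g : List (List Int)) :
    solve_alt g =
      ((PySem.Set.ofList
          ((pvPL (g.length : Int) ((PySem.List.pyGetD g 0 []).length : Int)).flatMap
            (fun p => if pvCell g p.1 p.2 == 5 then
                pvNeighList (g.length : Int) ((PySem.List.pyGetD g 0 []).length : Int) p.1 p.2
              else []))).map
        (fun k => (k,
          (((pvPL (g.length : Int) ((PySem.List.pyGetD g 0 []).length : Int)).flatMap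
            (fun p => if pvCell g p.1 p.2 == 5 then
                pvNeighList (g.length : Int) ((PySem.List.pyGetD g 0 []).length : Int) p.1 p.2
              else [])).count k : Int)))).foldl
        (fun out it =>
          if 2 ≤ it.2 ∧ pvCell g it.1.1 it.1.2 == 0 then pvSet2 out it.1.1 it.1.2 else out) g := by
  rw [solve_alt]
  rw [pvNB_def, PySem.Dict.foldl_insert_getD_add_one_eq_counter, PySem.Dict.items_counter]

-- ===== VERDICT (by name: the statement is the Claim_ definition above) =====
theorem solve_spec : Claim_equal_solve := by
  intro g _ hpre
  unfold Spec_solve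
  obtain ⟨hne, hlenrow⟩ := hpre
  have hhead : PySem.List.pyGetD g 0 [] = g.headD [] := by
    cases g with
    | nil => cases hne rfl
    | cons x xs => rw [PySem.List.pyGetD_of_nonneg _ _ le_rfl]; rfl
  have hcols : ∀ row ∈ g, ((PySem.List.pyGetD g 0 []).length : Int) ≤ (row.length : Int) := by
    intro row hrow
    rw [hhead]
    exact_mod_cast hlenrow row hrow
  rw [pvSolve_eq_markFold, pvSolveAlt_eq_markFold]
  set cols : Int := ((PySem.List.pyGetD g 0 []).length : Int) with hcolsdef
  set rows : Int := (g.length : Int) with hrowsdef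
  set NB : List (Int × Int) := (pvPL rows cols).flatMap
      (fun p => if pvCell g p.1 p.2 == 5 then pvNeighList rows cols p.1 p.2 else []) with hNBdef
  have hNBInB : ∀ x ∈ NB, pvInB rows cols x := by
    intro x hx
    obtain ⟨p, hp, hxp⟩ := List.mem_flatMap.mp hx
    by_cases h5 : pvCell g p.1 p.2 == 5
    · rw [if_pos h5] at hxp
      exact (pvMem_neighList.mp hxp).1
    · rw [if_neg h5] at hxp
      cases hxp
  have hLB : ∀ it ∈ (PySem.Set.ofList NB).map (fun k => (k, (NB.count k : Int))),
      (2 ≤ it.2 ∧ pvCell g it.1.1 it.1.2 == 0) → pvInB rows cols it.1 := by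
    intro it hit _
    obtain ⟨k, hk, rfl⟩ := List.mem_map.mp hit
    exact hNBInB k ((PySem.Set.mem_ofList NB k).mp hk)
  have charA := fun (r c : Int) hr hc => pvCell_markFold g rows cols hrowsdef hcols
      (fun p : Int × Int => p)
      (fun p => pvCell g p.1 p.2 == 0 ∧ 2 ≤ pvCountAdj g rows cols p.1 p.2)
      (pvPL rows cols) (fun p hp _ => pvMem_PL.mp hp) g rfl (fun _ => rfl) r c hr hc
  have charB := fun (r c : Int) hr hc => pvCell_markFold g rows cols hrowsdef hcols
      (fun it : (Int × Int) × Int => it.1)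
      (fun it => 2 ≤ it.2 ∧ pvCell g it.1.1 it.1.2 == 0)
      ((PySem.Set.ofList NB).map (fun k => (k, (NB.count k : Int))))
      hLB g rfl (fun _ => rfl) r c hr hc
  have hged : ∀ (X : List (List Int)) (i : Nat) (hi : i < X.length), X[i] = X.getD i [] := by
    intro X i hi
    rw [List.getD_eq_getElem?_getD, List.getElem?_eq_getElem hi]
    rfl
  have hcell : ∀ (X : List (List Int)) (i j : Nat) (hi : i < X.length)
      (hj : j < (X[i]'hi).length), (X[i]'hi)[j]'hj = pvCell X (i : Int) (j : Int) := by
    intro X i j hi hj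
    rw [pvCell, PySem.List.pyGetD_natCast, PySem.List.pyGetD_natCast, ← hged X i hi,
      List.getD_eq_getElem?_getD, List.getElem?_eq_getElem hj]
    rfl
  have lenA := pvLength_markFold (fun p : Int × Int => p)
      (fun p => pvCell g p.1 p.2 == 0 ∧ 2 ≤ pvCountAdj g rows cols p.1 p.2) (pvPL rows cols) g
  have lenB := pvLength_markFold (fun it : (Int × Int) × Int => it.1)
      (fun it => 2 ≤ it.2 ∧ pvCell g it.1.1 it.1.2 == 0)
      ((PySem.Set.ofList NB).map (fun k => (k, (NB.count k : Int)))) g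
  have rowlenA := pvRowLen_markFold (fun p : Int × Int => p)
      (fun p => pvCell g p.1 p.2 == 0 ∧ 2 ≤ pvCountAdj g rows cols p.1 p.2) (pvPL rows cols) g
  have rowlenB := pvRowLen_markFold (fun it : (Int × Int) × Int => it.1)
      (fun it => 2 ≤ it.2 ∧ pvCell g it.1.1 it.1.2 == 0)
      ((PySem.Set.ofList NB).map (fun k => (k, (NB.count k : Int)))) g
  have hiff : ∀ (q : Int × Int),
      (∃ p ∈ pvPL rows cols,
          (pvCell g p.1 p.2 == 0 ∧ 2 ≤ pvCountAdj g rows cols p.1 p.2) ∧ p = q) ↔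
      (∃ it ∈ (PySem.Set.ofList NB).map (fun k => (k, (NB.count k : Int))),
          (2 ≤ it.2 ∧ pvCell g it.1.1 it.1.2 == 0) ∧ it.1 = q) := by
    intro q
    constructor
    · rintro ⟨p, hp, ⟨h0, h2⟩, rfl⟩
      have hInB : pvInB rows cols p := pvMem_PL.mp hp
      have hcnt : ((NB.count p : Nat) : Int) = pvCountAdj g rows cols p.1 p.2 :=
        pvScatter_gather g rows cols p hInB
      have hcnt2 : 2 ≤ NB.count p := by
        have h : (2 : Int) ≤ ((NB.count p : Nat) : Int) := by rw [hcnt]; exact h2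
        exact_mod_cast h
      have hmem : p ∈ NB := List.count_pos_iff.mp (by omega)  -- count ≥ 2 > 0
      refine ⟨(p, (NB.count p : Int)),
        List.mem_map.mpr ⟨p, (PySem.Set.mem_ofList NB p).mpr hmem, rfl⟩, ⟨?_, h0⟩, rfl⟩
      show (2 : Int) ≤ ((NB.count p : Nat) : Int)
      exact_mod_cast hcnt2
    · rintro ⟨it, hit, ⟨h2, h0⟩, hk⟩
      obtain ⟨k, hkmem, rfl⟩ := List.mem_map.mp hit
      have hmem : k ∈ NB := (PySem.Set.mem_ofList NB k).mp hkmem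
      have hInB : pvInB rows cols k := hNBInB k hmem
      have hcnt : ((NB.count k : Nat) : Int) = pvCountAdj g rows cols k.1 k.2 :=
        pvScatter_gather g rows cols k hInB
      subst hk
      exact ⟨k, pvMem_PL.mpr hInB, ⟨h0, by rw [← hcnt]; exact h2⟩, rfl⟩
  refine List.ext_getElem (lenA.trans lenB.symm) ?_
  intro i h1 h2
  refine List.ext_getElem ?_ ?_
  · rw [hged _ i h1, hged _ i h2]
    exact (rowlenA i).trans (rowlenB i).symm
  · intro j hj1 hj2
    rw [hcell _ i j h1 hj1, hcell _ i j h2 hj2]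
    by_cases hcond : ∃ p ∈ pvPL rows cols,
        (pvCell g p.1 p.2 == 0 ∧ 2 ≤ pvCountAdj g rows cols p.1 p.2) ∧ p = ((i : Int), (j : Int))
    · exact ((charA (i : Int) (j : Int) (Int.natCast_nonneg i) (Int.natCast_nonneg j)).1 hcond).trans
        (((charB (i : Int) (j : Int) (Int.natCast_nonneg i) (Int.natCast_nonneg j)).1
          ((hiff _).mp hcond)).symm)
    · exact ((charA (i : Int) (j : Int) (Int.natCast_nonneg i) (Int.natCast_nonneg j)).2 hcond).trans
        (((charB (i : Int) (j : Int) (Int.natCast_nonneg i) (Int.natCast_nonneg j)).2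
          (fun hB => hcond ((hiff _).mpr hB))).symm)
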